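-- pv_equiv track=rewrite | github.com/detroyejr/2018-advent-of-code | src/02.py | appears_three
-- ===== SOURCE A (Python) =====
-- def appears_three(x):
--     counter = 0
--     for v in x:
--         for i in set(v):
--             n = v.count(i)
--             if n == 3:
--                 counter += 1
--                 break
--     return counter
-- ===== SOURCE B (Python) =====
-- def _has_run3(cs):
--     # cs is sorted; scan maximal runs of equal chars
--     while cs:
--         c = cs[0]
--         k = 1
--         while k < len(cs) and cs[k] == c:
--             k += 1
--         if k == 3:
--             return True
--         cs = cs[k:]
--     return False
--
-- def appears_three(x):
--     count = 0
--     for v in x: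
--         if _has_run3(sorted(v)):
--             count += 1
--     return count
-- ===== Notes on version B (the rewrite author's own statement) =====
-- stated objective: alternative
-- what changed: Replaces A's per-distinct-character repeated v.count() scans by sorting each string's characters and scanning the maximal runs of equal characters once, incrementing if any run has length exactly 3.
import Mathlib
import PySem

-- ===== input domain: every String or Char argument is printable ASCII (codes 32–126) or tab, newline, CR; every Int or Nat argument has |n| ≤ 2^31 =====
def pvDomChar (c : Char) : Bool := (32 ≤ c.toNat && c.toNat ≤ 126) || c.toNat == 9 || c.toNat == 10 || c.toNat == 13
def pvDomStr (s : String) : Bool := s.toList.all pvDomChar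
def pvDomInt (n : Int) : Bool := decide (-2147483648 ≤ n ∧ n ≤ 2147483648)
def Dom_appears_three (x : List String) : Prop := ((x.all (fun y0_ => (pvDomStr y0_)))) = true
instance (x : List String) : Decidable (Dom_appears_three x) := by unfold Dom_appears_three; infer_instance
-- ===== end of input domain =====

-- B sorts each string's characters and scans maximal equal runs once, instead of A's per-distinct-char repeated count scans.


-- ===== PORT A =====
-- inner 'for i in set(v): if v.count(i) == 3: counter += 1; break'
-- (break modelled by returning; the result does not depend on the set's iteration order)
def appearsThreeInner (v : List Char) : List Char → Int → Int
  | [], counter => counter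
  | i :: rest, counter =>
      if v.count i = 3 then counter + 1 else appearsThreeInner v rest counter

def appears_three (x : List String) : Int :=
  x.foldl (fun counter v => appearsThreeInner v.toList (PySem.Set.ofList v.toList) counter) 0

-- ===== PORT B =====
-- '_has_run3': while cs: scan the run of cs[0] (takeWhile), test its length == 3, continue on the rest (dropWhile)
def hasRun3 : List Char → Bool
  | [] => false
  | c :: rest =>
      if (rest.takeWhile (fun d => d == c)).length + 1 = 3 then true
      else hasRun3 (rest.dropWhile (fun d => d == c))
termination_by cs => cs.length
decreasing_by
  simpa using Nat.lt_succ_of_le (List.length_dropWhile_le _ _)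

def appears_three_alt (x : List String) : Int :=
  x.foldl (fun count v =>
    if hasRun3 (PySem.List.sorted v.toList (fun c => c) false) then count + 1 else count) 0

-- ===== PRECONDITION & SPEC =====
def Spec_appears_three (x : List String) (out : Int) : Prop := out = appears_three_alt x
instance (x : List String) (out : Int) : Decidable (Spec_appears_three x out) := by unfold Spec_appears_three; infer_instance

-- ===== CLAIM (what is proved, stated in full; the proofs are below) =====
def Claim_equal_appears_three : Prop := ∀ (x : List String), Dom_appears_three x → Spec_appears_three x (appears_three x)

-- ===== LEMMAS AND PROOFS =====

-- A's inner break-loop adds 1 iff some element of s has count 3 in v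
theorem appearsThreeInner_eq (v : List Char) (s : List Char) (counter : Int) :
    appearsThreeInner v s counter = if ∃ c ∈ s, v.count c = 3 then counter + 1 else counter := by
  induction s with
  | nil => simp [appearsThreeInner]
  | cons i rest ih =>
      by_cases h : v.count i = 3 <;> simp [appearsThreeInner, h, ih]

-- on a sorted list headed by c, c does not occur after its run
theorem not_mem_dropWhile_of_sorted (c : Char) (rest : List Char)
    (hs : (c :: rest).Pairwise (· ≤ ·)) :
    c ∉ rest.dropWhile (fun d => d == c) := by
  intro hmem
  have hsub : (rest.dropWhile (fun d => d == c)).Sublist rest := List.dropWhile_sublist _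
  rcases h : rest.dropWhile (fun d => d == c) with _ | ⟨d, tl⟩
  · simp [h] at hmem
  · have hd : ¬ (d == c) = true := by
      have := List.head_dropWhile_not (p := fun d => d == c) (l := rest) (by simp [h])
      simpa [h] using this
    have hdc : d ≠ c := by simpa using hd
    -- d ≤ every later element; c ≤ d since c heads the sorted list
    have hcd : c ≤ d := by
      have := (List.pairwise_cons.mp hs).1
      exact this d (hsub.mem (by simp [h]))
    rw [h] at hmem
    rcases List.mem_cons.mp hmem with hmem | hmem
    · exact hdc hmem.symm
    · -- c appears after d in the sorted tail: d ≤ c, so d = c, contradiction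
      have hs' : (d :: tl).Pairwise (· ≤ ·) := by
        have : (d :: tl).Sublist (c :: rest) := by
          rw [← h]; exact hsub.cons _
        exact hs.sublist this
      have hdc' : d ≤ c := (List.pairwise_cons.mp hs').1 c hmem
      exact hdc (le_antisymm hdc' hcd)

-- count of the head on a sorted list is its run length
theorem count_head_of_sorted (c : Char) (rest : List Char)
    (hs : (c :: rest).Pairwise (· ≤ ·)) :
    (c :: rest).count c = (rest.takeWhile (fun d => d == c)).length + 1 := by
  have hsplit : rest = rest.takeWhile (fun d => d == c) ++ rest.dropWhile (fun d => d == c) :=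
    (List.takeWhile_append_dropWhile).symm
  have htake : (rest.takeWhile (fun d => d == c)).count c
      = (rest.takeWhile (fun d => d == c)).length := by
    apply List.count_eq_length.mpr
    intro b hb
    have hb' : b = c := by simpa using List.mem_takeWhile_imp hb
    exact hb'.symm
  have hdrop : (rest.dropWhile (fun d => d == c)).count c = 0 :=
    List.count_eq_zero.mpr (not_mem_dropWhile_of_sorted c rest hs)
  calc (c :: rest).count c = rest.count c + 1 := by simp
    _ = (rest.takeWhile (fun d => d == c)).length + 1 := by
        conv_lhs => rw [hsplit]
        rw [List.count_append, htake, hdrop]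

-- count of a non-head char is unchanged by dropping the head run
theorem count_ne_head_of_sorted (c b : Char) (rest : List Char) (hbc : b ≠ c) :
    (c :: rest).count b = (rest.dropWhile (fun d => d == c)).count b := by
  have hsplit : rest = rest.takeWhile (fun d => d == c) ++ rest.dropWhile (fun d => d == c) :=
    (List.takeWhile_append_dropWhile).symm
  have htake : (rest.takeWhile (fun d => d == c)).count b = 0 := by
    apply List.count_eq_zero.mpr
    intro hb
    have := List.mem_takeWhile_imp hb
    exact hbc (by simpa using this)
  calc (c :: rest).count b = rest.count b := List.count_cons_of_ne (fun h => hbc h.symm)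
    _ = _ := by
        conv_lhs => rw [hsplit]
        rw [List.count_append, htake, Nat.zero_add]

-- membership beyond the head run, for a non-head char
theorem mem_dropWhile_of_ne (c b : Char) (rest : List Char) (hbc : b ≠ c)
    (hb : b ∈ c :: rest) : b ∈ rest.dropWhile (fun d => d == c) := by
  have hsplit : rest = rest.takeWhile (fun d => d == c) ++ rest.dropWhile (fun d => d == c) :=
    (List.takeWhile_append_dropWhile).symm
  rcases List.mem_cons.mp hb with hb | hb
  · exact absurd hb hbc
  · rw [hsplit] at hb
    rcases List.mem_append.mp hb with h | h
    · exact absurd (by simpa using List.mem_takeWhile_imp h) hbc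
    · exact h

-- the run scanner on a sorted list finds exactly the chars of count 3
theorem hasRun3_iff (cs : List Char) (hs : cs.Pairwise (· ≤ ·)) :
    hasRun3 cs = true ↔ ∃ c ∈ cs, cs.count c = 3 := by
  induction cs using hasRun3.induct with
  | case1 => simp [hasRun3]
  | case2 c rest hlen =>
      rw [hasRun3, if_pos hlen]
      have hc := count_head_of_sorted c rest hs
      simp only [true_iff]
      exact ⟨c, by simp, by omega⟩
  | case3 c rest hlen ih =>
      rw [hasRun3, if_neg hlen]
      have hs' : (rest.dropWhile (fun d => d == c)).Pairwise (· ≤ ·) :=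
        hs.sublist ((List.dropWhile_sublist _).cons _)
      rw [ih hs']
      constructor
      · rintro ⟨b, hb, hcnt⟩
        have hsub : (rest.dropWhile (fun d => d == c)).Sublist (c :: rest) :=
          (List.dropWhile_sublist _).cons _
        have hbc : b ≠ c := by
          rintro rfl
          exact not_mem_dropWhile_of_sorted b rest hs hb
        exact ⟨b, hsub.mem hb, by rw [count_ne_head_of_sorted c b rest hbc]; exact hcnt⟩
      · rintro ⟨b, hb, hcnt⟩
        have hbc : b ≠ c := by
          rintro rfl
          have := count_head_of_sorted b rest hs
          omega
        exact ⟨b, mem_dropWhile_of_ne c b rest hbc hb,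
          by rw [← count_ne_head_of_sorted c b rest hbc]; exact hcnt⟩

-- ===== VERDICT (by name: the statement is the Claim_ definition above) =====
theorem appears_three_spec : Claim_equal_appears_three := by
  intro x _
  unfold Spec_appears_three appears_three appears_three_alt
  apply PySem.List.foldl_congr_mem
  intro counter v _
  rw [appearsThreeInner_eq]
  have hperm : (PySem.List.sorted v.toList (fun c => c) false).Perm v.toList :=
    PySem.List.sorted_perm _ _ _
  have hpw : (PySem.List.sorted v.toList (fun c => c) false).Pairwise (· ≤ ·) := by
    simpa using PySem.List.sorted_pairwise (xs := v.toList) (key := fun c => c)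
  have hiff : (∃ c ∈ PySem.Set.ofList v.toList, v.toList.count c = 3)
      ↔ hasRun3 (PySem.List.sorted v.toList (fun c => c) false) = true := by
    rw [hasRun3_iff _ hpw]
    constructor
    · rintro ⟨c, hc, hcnt⟩
      exact ⟨c, hperm.mem_iff.mpr ((PySem.Set.mem_ofList _ _).mp hc), by rw [hperm.count_eq]; exact hcnt⟩
    · rintro ⟨c, hc, hcnt⟩
      exact ⟨c, (PySem.Set.mem_ofList _ _).mpr (hperm.mem_iff.mp hc), by rw [← hperm.count_eq]; exact hcnt⟩
  by_cases h : ∃ c ∈ PySem.Set.ofList v.toList, v.toList.count c = 3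
  · rw [if_pos h, if_pos (hiff.mp h)]
  · rw [if_neg h, if_neg (fun hm => h (hiff.mpr hm))]
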